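-- pv_equiv track=rewrite | github.com/gamescomputersplay/leetcode | 0018-4sum.py | compare_lists
-- ===== SOURCE A (Python) =====
-- def compare_lists(list1, list2):
--     ''' Compare lists (will sort the lists)
--     '''
--     if type(list1) != type(list2):
--         return False
--     if isinstance(list1, list) and isinstance(list2, list):
--         list1.sort()
--         list2.sort()
--         if len(list1) != len(list2):
--             return False
--         for i in range(len(list1)):
--             if not compare_lists(list1[i], list2[i]):
--                 return False
--     else:
--         if list1 != list2:
--             return False
--     return True
-- ===== SOURCE B (Python) =====
-- def compare_lists(list1, list2):
--     # Return-value equivalent to A; unlike A, does not sort the inputs in place.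
--     if len(list1) != len(list2):
--         return False
--     return all(sorted(a) == sorted(b) for a, b in zip(sorted(list1), sorted(list2)))
-- ===== Notes on version B (the rewrite author's own statement) =====
-- stated objective: simpler
-- what changed: Replaces the type-dispatching recursion and index loops with a length check plus a single all() over zipped sorted outer lists comparing sorted sublists (no per-element recursive calls or type checks); B also does not mutate its arguments (A sorts them in place), return values are identical.
import Mathlib
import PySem

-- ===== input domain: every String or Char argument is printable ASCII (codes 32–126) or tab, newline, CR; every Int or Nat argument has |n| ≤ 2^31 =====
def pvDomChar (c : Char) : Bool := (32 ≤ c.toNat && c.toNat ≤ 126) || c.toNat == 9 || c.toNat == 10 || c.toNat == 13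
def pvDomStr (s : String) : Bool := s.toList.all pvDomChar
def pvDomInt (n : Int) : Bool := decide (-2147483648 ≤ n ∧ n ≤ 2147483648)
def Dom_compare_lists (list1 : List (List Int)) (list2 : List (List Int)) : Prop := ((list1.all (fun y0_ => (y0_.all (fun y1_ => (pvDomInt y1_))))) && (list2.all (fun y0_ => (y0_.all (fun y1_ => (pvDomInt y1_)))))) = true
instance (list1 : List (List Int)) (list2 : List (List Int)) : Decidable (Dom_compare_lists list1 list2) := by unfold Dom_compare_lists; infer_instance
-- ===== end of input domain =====

-- B replaces A's type-dispatching recursion by a length check plus one all() over zipped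
-- sorted lists; equivalence is about the RETURN value only (A sorts its arguments in place, B does not).

-- ===== PORT A =====
-- the recursive call compare_lists(list1[i], list2[i]) at the inner level: both are lists of ints,
-- so it sorts them, checks lengths and compares the ints elementwise (the non-list else-branch)
def pvCompareInner (x y : List Int) : Bool :=
  let t1 := PySem.List.sorted x (fun v => v) false
  let t2 := PySem.List.sorted y (fun v => v) false
  if t1.length ≠ t2.length then false
  else (List.range t1.length).all (fun i => t1.getD i 0 == t2.getD i 0)

def compare_lists (list1 : List (List Int)) (list2 : List (List Int)) : Bool :=
  -- type(list1) == type(list2) and both are lists at this level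
  let s1 := PySem.List.sorted list1 (fun v => v) false
  let s2 := PySem.List.sorted list2 (fun v => v) false
  if s1.length ≠ s2.length then false
  else (List.range s1.length).all (fun i => pvCompareInner (s1.getD i []) (s2.getD i []))

-- ===== PORT B =====
def compare_lists_alt (list1 : List (List Int)) (list2 : List (List Int)) : Bool :=
  if list1.length ≠ list2.length then false
  else
    (((PySem.List.sorted list1 (fun v => v) false).zip
        (PySem.List.sorted list2 (fun v => v) false)).all
      (fun p => PySem.List.sorted p.1 (fun v => v) false == PySem.List.sorted p.2 (fun v => v) false))

-- ===== PRECONDITION & SPEC =====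
def Spec_compare_lists (list1 : List (List Int)) (list2 : List (List Int)) (out : Bool) : Prop := out = compare_lists_alt list1 list2
instance (list1 : List (List Int)) (list2 : List (List Int)) (out : Bool) : Decidable (Spec_compare_lists list1 list2 out) := by unfold Spec_compare_lists; infer_instance

-- ===== CLAIM (what is proved, stated in full; the proofs are below) =====
def Claim_equal_compare_lists : Prop := ∀ (list1 : List (List Int)) (list2 : List (List Int)), Dom_compare_lists list1 list2 → Spec_compare_lists list1 list2 (compare_lists list1 list2)

-- ===== LEMMAS AND PROOFS =====

-- an index loop over two equal-length lists is the all() over their zip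
lemma all_range_getD {α : Type} (g : α → α → Bool) (d : α) :
    ∀ (t1 t2 : List α), t1.length = t2.length →
      ((List.range t1.length).all (fun i => g (t1.getD i d) (t2.getD i d)))
        = (t1.zip t2).all (fun p => g p.1 p.2) := by
  intro t1
  induction t1 with
  | nil => intro t2 h; simp
  | cons a as ih =>
    intro t2 h
    cases t2 with
    | nil => simp at h
    | cons b bs =>
      simp only [List.length_cons] at h ⊢
      rw [List.range_succ_eq_map, List.all_cons, List.all_map]
      simp only [List.getD_cons_zero, List.zip_cons_cons, List.all_cons]
      congr 1
      exact ih bs (by omega)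

-- elementwise == over equal-length lists is list equality
lemma all_zip_beq : ∀ (t1 t2 : List Int), t1.length = t2.length →
    ((t1.zip t2).all (fun p => p.1 == p.2)) = (t1 == t2) := by
  intro t1
  induction t1 with
  | nil => intro t2 h; cases t2 with
    | nil => rfl
    | cons b bs => simp at h
  | cons a as ih =>
    intro t2 h
    cases t2 with
    | nil => simp at h
    | cons b bs =>
      simp only [List.length_cons] at h
      simp only [List.zip_cons_cons, List.all_cons, List.cons_beq_cons]
      rw [ih bs (by omega)]

lemma pvCompareInner_eq (x y : List Int) :
    pvCompareInner x y
      = (PySem.List.sorted x (fun v => v) false == PySem.List.sorted y (fun v => v) false) := by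
  unfold pvCompareInner
  set t1 := PySem.List.sorted x (fun v => v) false with ht1
  set t2 := PySem.List.sorted y (fun v => v) false with ht2
  by_cases h : t1.length = t2.length
  · rw [if_neg (by simp [h])]
    rw [all_range_getD (fun a b => a == b) 0 t1 t2 h, all_zip_beq t1 t2 h]
  · rw [if_pos h]
    symm
    rw [beq_eq_false_iff_ne]
    intro he; exact h (by rw [he])

-- ===== VERDICT (by name: the statement is the Claim_ definition above) =====
theorem compare_lists_spec : Claim_equal_compare_lists := by
  intro list1 list2 _
  unfold Spec_compare_lists compare_lists compare_lists_alt
  set s1 := PySem.List.sorted list1 (fun v => v) false with hs1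
  set s2 := PySem.List.sorted list2 (fun v => v) false with hs2
  have hl1 : s1.length = list1.length := by rw [hs1]; exact PySem.List.length_sorted ..
  have hl2 : s2.length = list2.length := by rw [hs2]; exact PySem.List.length_sorted ..
  by_cases h : list1.length = list2.length
  · have hs : s1.length = s2.length := by rw [hl1, hl2, h]
    rw [if_neg (by simp [hs]), if_neg (by simp [h])]
    rw [all_range_getD pvCompareInner [] s1 s2 hs]
    simp only [pvCompareInner_eq]
  · have hs : ¬ s1.length = s2.length := by rw [hl1, hl2]; exact h
    simp [hs, h]
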